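-- pv_equiv track=rewrite | github.com/BrunelJacques/NoeGestion | py_rainbow/Noethys/FonctionsPerso.py | ChiffresSeuls
-- ===== SOURCE A (Python) =====
-- def ChiffresSeuls(txt = ""):
--     if txt == None: txt = ""
--     permis = "0123456789+-.,"
--     new = ""
--     for a in txt:
--         if a in permis:
--             new += a
--     return new
-- ===== SOURCE B (Python) =====
-- import re
--
-- def ChiffresSeuls(txt=""):
--     if txt is None:
--         txt = ""
--     return re.sub(r'[^0-9+.,-]', '', txt)
-- ===== Notes on version B (the rewrite author's own statement) =====
-- stated objective: idiomatic
-- what changed: Replaces the explicit accumulation loop with per-character membership tests by a single re.sub with the complement character class [^0-9+.,-] over the whole string.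
import Mathlib
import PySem

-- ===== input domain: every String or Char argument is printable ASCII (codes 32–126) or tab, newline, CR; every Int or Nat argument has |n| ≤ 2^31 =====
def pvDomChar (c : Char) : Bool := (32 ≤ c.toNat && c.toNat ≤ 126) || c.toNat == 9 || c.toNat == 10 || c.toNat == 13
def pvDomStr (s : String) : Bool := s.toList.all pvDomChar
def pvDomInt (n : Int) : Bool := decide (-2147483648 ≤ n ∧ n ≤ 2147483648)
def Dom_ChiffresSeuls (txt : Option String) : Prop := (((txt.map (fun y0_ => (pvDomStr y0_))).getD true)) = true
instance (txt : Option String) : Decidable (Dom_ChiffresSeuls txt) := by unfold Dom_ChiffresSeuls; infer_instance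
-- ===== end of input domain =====

-- B replaces A's explicit accumulation loop with membership tests by a single
-- regex substitution deleting the complement character class (idiomatic, same cost).

-- ===== PORT A =====
-- loop `for a in txt: if a in permis: new += a` over the char list; `new` kept as List Char
def ChiffresSeuls (txt : Option String) : String :=
  let txt' : String := match txt with
    | none => ""          -- if txt == None: txt = ""
    | some s => s
  let permis : String := "0123456789+-.,"
  String.mk (txt'.toList.foldl (fun new a => if a ∈ permis.toList then new ++ [a] else new) [])

-- ===== PORT B =====
-- the regex character class [0-9+.,-]: a char survives re.sub(r'[^0-9+.,-]', '', txt) iff it matches this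
def pvAllowed (c : Char) : Bool :=
  (decide ('0' ≤ c ∧ c ≤ '9')) || c == '+' || c == '.' || c == ',' || c == '-'

-- re.sub with empty replacement of the complement class = keep exactly the matching chars, in order
def ChiffresSeuls_alt (txt : Option String) : String :=
  let t : String := match txt with
    | none => ""          -- if txt is None: txt = ""
    | some s => s
  String.mk (t.toList.filter pvAllowed)

-- ===== PRECONDITION & SPEC =====
def Spec_ChiffresSeuls (txt : Option String) (out : String) : Prop := out = ChiffresSeuls_alt txt
instance (txt : Option String) (out : String) : Decidable (Spec_ChiffresSeuls txt out) := by unfold Spec_ChiffresSeuls; infer_instance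

-- ===== CLAIM (what is proved, stated in full; the proofs are below) =====
def Claim_equal_ChiffresSeuls : Prop := ∀ (txt : Option String), Dom_ChiffresSeuls txt → Spec_ChiffresSeuls txt (ChiffresSeuls txt)

-- ===== LEMMAS AND PROOFS =====

-- membership in A's literal string "0123456789+-.," coincides with B's character class [0-9+.,-]
theorem pv_mem_permis_iff (c : Char) :
    c ∈ ("0123456789+-.,".toList) ↔ pvAllowed c = true := by
  have hL : "0123456789+-.,".toList
      = ['0','1','2','3','4','5','6','7','8','9','+','-','.',','] := by decide
  rw [hL]
  constructor
  · intro h; fin_cases h <;> decide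
  · intro h
    simp only [pvAllowed, Bool.or_eq_true, decide_eq_true_eq, beq_iff_eq] at h
    rcases h with ((((⟨h1, h2⟩ | h) | h) | h) | h)
    · rw [Char.le_def, UInt32.le_iff_toNat_le] at h1 h2
      have hc : ∀ (d : Char), c.val.toNat = d.val.toNat → c = d := by
        intro d hd; exact Char.ext (UInt32.toNat.inj hd)
      have hv : c.val.toNat = 48 ∨ c.val.toNat = 49 ∨ c.val.toNat = 50 ∨ c.val.toNat = 51 ∨
          c.val.toNat = 52 ∨ c.val.toNat = 53 ∨ c.val.toNat = 54 ∨ c.val.toNat = 55 ∨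
          c.val.toNat = 56 ∨ c.val.toNat = 57 := by
        simp only [show ('0' : Char).val.toNat = 48 from rfl,
          show ('9' : Char).val.toNat = 57 from rfl] at h1 h2
        omega
      rcases hv with h | h | h | h | h | h | h | h | h | h
      · rw [hc '0' h]; decide
      · rw [hc '1' h]; decide
      · rw [hc '2' h]; decide
      · rw [hc '3' h]; decide
      · rw [hc '4' h]; decide
      · rw [hc '5' h]; decide
      · rw [hc '6' h]; decide
      · rw [hc '7' h]; decide
      · rw [hc '8' h]; decide
      · rw [hc '9' h]; decide
    all_goals rw [h]; decide

theorem pv_decide_mem_eq_allowed (c : Char) :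
    (decide (c ∈ ("0123456789+-.,".toList))) = pvAllowed c := by
  by_cases h : c ∈ ("0123456789+-.,".toList)
  · rw [decide_eq_true h]; exact ((pv_mem_permis_iff c).mp h).symm
  · rw [decide_eq_false h]
    cases hp : pvAllowed c with
    | false => rfl
    | true => exact absurd ((pv_mem_permis_iff c).mpr hp) h

-- ===== VERDICT (by name: the statement is the Claim_ definition above) =====
theorem ChiffresSeuls_spec : Claim_equal_ChiffresSeuls := by
  intro txt _
  unfold Spec_ChiffresSeuls ChiffresSeuls ChiffresSeuls_alt
  cases txt <;>
  · dsimp only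
    rw [PySem.List.foldl_append_ite_eq_filter]
    rw [List.filter_congr (fun c _ => pv_decide_mem_eq_allowed c)]
    simp
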